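-- pv_equiv track=rewrite | github.com/timtronic477/codewars | Special Number.py | special_number
-- ===== SOURCE A (Python) =====
-- def special_number(number):
--     nums = "012345"
--     for i in list(str(number)):
--         if i in nums:
--             pass
--         else:
--             return "NOT!!"
--     return "Special!!"
-- ===== SOURCE B (Python) =====
-- def special_number(number):
--     if number < 0:
--         return "NOT!!"
--     n = number
--     while n > 9:
--         if n % 10 > 5:
--             return "NOT!!"
--         n //= 10
--     return "Special!!" if n <= 5 else "NOT!!"
-- ===== Notes on version B (the rewrite author's own statement) =====
-- stated objective: alternative
-- what changed: B never converts the number to a string: it rejects negatives by sign and then extracts decimal digits arithmetically with modulo and integer division, checking each digit stays in the allowed range, instead of A's per-character scan of str(number).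
import Mathlib
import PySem

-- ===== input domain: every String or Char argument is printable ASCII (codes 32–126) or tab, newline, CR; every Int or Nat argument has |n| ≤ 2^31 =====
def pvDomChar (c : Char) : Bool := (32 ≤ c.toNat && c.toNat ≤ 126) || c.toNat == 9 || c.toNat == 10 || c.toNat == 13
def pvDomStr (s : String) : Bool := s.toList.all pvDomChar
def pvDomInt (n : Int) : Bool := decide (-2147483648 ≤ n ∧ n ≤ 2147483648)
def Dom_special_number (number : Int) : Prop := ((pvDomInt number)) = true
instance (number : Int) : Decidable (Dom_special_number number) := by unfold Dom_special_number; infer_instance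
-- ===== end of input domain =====

-- B avoids str() entirely: it tests the sign and then the decimal digits arithmetically (% 10, // 10).

-- ===== PORT A =====
-- the 'for i in list(str(number))' loop with its early 'return "NOT!!"'
def specialLoopA (nums : List Char) : List Char → String
  | [] => "Special!!"
  | c :: rest => if c ∈ nums then specialLoopA nums rest else "NOT!!"

def special_number (number : Int) : String :=
  specialLoopA "012345".toList (PySem.Int.toStr number).toList

-- ===== PORT B =====
-- the 'while n > 9' digit-extraction loop of Source B (n ≥ 0 here, negatives handled before)
def digitsOkB (n : Nat) : Bool :=
  if n ≤ 9 then decide (n ≤ 5)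
  else decide (n % 10 ≤ 5) && digitsOkB (n / 10)
decreasing_by exact Nat.div_lt_self (by omega) (by omega)

def special_number_alt (number : Int) : String :=
  if number < 0 then "NOT!!"
  else if digitsOkB number.toNat then "Special!!" else "NOT!!"

-- ===== PRECONDITION & SPEC =====
def Spec_special_number (number : Int) (out : String) : Prop := out = special_number_alt number
instance (number : Int) (out : String) : Decidable (Spec_special_number number out) := by unfold Spec_special_number; infer_instance

-- ===== CLAIM =====
def Claim_equal_special_number : Prop := ∀ (number : Int), Dom_special_number number → Spec_special_number number (special_number number)

-- ===== LEMMAS AND PROOFS =====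

-- A's loop returns "Special!!" iff every character is in nums
theorem specialLoopA_eq (nums l : List Char) :
    specialLoopA nums l = if ∀ c ∈ l, c ∈ nums then "Special!!" else "NOT!!" := by
  induction l with
  | nil => simp [specialLoopA]
  | cons c rest ih =>
    simp only [specialLoopA]
    by_cases hc : c ∈ nums
    · simp [hc, ih]
    · simp [hc]

theorem digitChar_mem_iff (d : Nat) (hd : d < 10) :
    (Nat.digitChar d ∈ "012345".toList) ↔ d ≤ 5 := by
  interval_cases d <;> decide

-- toDigitsCore characterization: with enough fuel, all emitted chars lie in "012345"
-- iff all decimal digits of n are ≤ 5 and the accumulator already satisfies it.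
theorem toDigitsCore_mem (fuel : Nat) :
    ∀ n ds, n < fuel →
      ((∀ c ∈ Nat.toDigitsCore 10 fuel n ds, c ∈ "012345".toList) ↔
        (digitsOkB n = true ∧ ∀ c ∈ ds, c ∈ "012345".toList)) := by
  induction fuel with
  | zero => intro n ds h; omega
  | succ f ih =>
    intro n ds _
    rw [Nat.toDigitsCore]
    by_cases h0 : n / 10 = 0
    · have hn9 : n ≤ 9 := by omega
      rw [if_pos h0]
      rw [digitsOkB]
      have hm : n % 10 = n := Nat.mod_eq_of_lt (by omega)
      constructor
      · intro h
        refine ⟨?_, fun c hc => h c (List.mem_cons_of_mem _ hc)⟩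
        simp only [if_pos hn9, decide_eq_true_eq]
        have hd := h _ (List.mem_cons_self ..)
        rw [digitChar_mem_iff (n % 10) (by omega)] at hd
        omega
      · rintro ⟨hok, hds⟩
        intro c hc
        rcases List.mem_cons.mp hc with rfl | hc
        · rw [digitChar_mem_iff (n % 10) (by omega), hm]
          simpa [hn9] using hok
        · exact hds c hc
    · have hn : 10 ≤ n := by
        by_contra h; exact h0 (Nat.div_eq_of_lt (by omega))
      rw [if_neg h0]
      have hdlt : n / 10 < n := Nat.div_lt_self (by omega) (by omega)
      have hrw : digitsOkB n = (decide (n % 10 ≤ 5) && digitsOkB (n / 10)) := by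
        rw [digitsOkB, if_neg (by omega)]
      rw [ih (n / 10) _ (by omega), hrw]
      constructor
      · rintro ⟨hok, hds⟩
        have hd := hds _ (List.mem_cons_self ..)
        rw [digitChar_mem_iff (n % 10) (Nat.mod_lt _ (by omega))] at hd
        constructor
        · simp only [Bool.and_eq_true, decide_eq_true_eq]
          exact ⟨hd, hok⟩
        · exact fun c hc => hds c (List.mem_cons_of_mem _ hc)
      · rintro ⟨hok, hds⟩
        simp only [Bool.and_eq_true, decide_eq_true_eq] at hok
        refine ⟨hok.2, fun c hc => ?_⟩
        rcases List.mem_cons.mp hc with rfl | hc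
        · exact (digitChar_mem_iff (n % 10) (Nat.mod_lt _ (by omega))).mpr hok.1
        · exact hds c hc

theorem toDigits_mem (n : Nat) :
    (∀ c ∈ Nat.toDigits 10 n, c ∈ "012345".toList) ↔ digitsOkB n = true := by
  rw [Nat.toDigits, toDigitsCore_mem (n + 1) n [] (by omega)]
  simp

-- ===== VERDICT =====
theorem special_number_spec : Claim_equal_special_number := by
  intro number _
  unfold Spec_special_number special_number special_number_alt
  rw [specialLoopA_eq]
  have htl : (PySem.Int.toStr number).toList = PySem.Int.toChars number :=
    PySem.Int.toList_toStr number
  rw [htl]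
  by_cases hneg : number < 0
  · rw [if_pos hneg]
    rw [if_neg]
    intro h
    have := h '-' (by simp [PySem.Int.toChars, if_pos hneg])
    revert this; decide
  · rw [if_neg hneg]
    simp only [PySem.Int.toChars, if_neg hneg]
    by_cases hb : digitsOkB number.toNat = true
    · rw [if_pos ((toDigits_mem number.toNat).mpr hb), if_pos hb]
    · rw [if_neg (fun h => hb ((toDigits_mem number.toNat).mp h)), if_neg hb]
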